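-- pv_equiv track=rewrite | github.com/TahjaeJackson/CS1_Projects | EXAM4/Question3.py | odd_index
-- ===== SOURCE A (Python) =====
-- def odd_index(glist, i = 0):
--     if i == len(glist):
--         return []
--     else:
--         new_list = odd_index(glist, i+1)
--
--     if i % 2 == 1:
--         new_list.insert(0,glist[i])
--
--     return new_list
-- ===== SOURCE B (Python) =====
-- def odd_index(glist, i = 0):
--     result = []
--     for j in range(i, len(glist)):
--         if j % 2 == 1:
--             result.append(glist[j])
--     return result
-- ===== Notes on version B (the rewrite author's own statement) =====
-- stated objective: simpler
-- what changed: Replaces the tail recursion with front-insertion by a single iterative forward pass over range(i, len(glist)) that appends matching elements.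
import Mathlib
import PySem

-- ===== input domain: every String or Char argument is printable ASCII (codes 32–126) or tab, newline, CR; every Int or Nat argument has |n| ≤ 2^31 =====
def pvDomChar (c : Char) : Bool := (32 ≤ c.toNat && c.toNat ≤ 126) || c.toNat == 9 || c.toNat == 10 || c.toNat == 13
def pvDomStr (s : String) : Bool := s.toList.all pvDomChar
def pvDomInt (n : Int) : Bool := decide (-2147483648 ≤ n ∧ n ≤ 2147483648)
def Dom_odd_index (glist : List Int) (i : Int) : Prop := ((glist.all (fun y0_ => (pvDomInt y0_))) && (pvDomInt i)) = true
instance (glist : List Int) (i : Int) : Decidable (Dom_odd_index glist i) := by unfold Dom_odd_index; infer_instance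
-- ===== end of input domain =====

-- B replaces A's tail recursion with front-insert by one iterative forward pass (simpler, no quadratic inserts).


-- ===== PORT A =====
-- Fuel makes the Python recursion total; under Pre_ the fuel is never exhausted.
-- glist[i] is pyGet?; Pre_ excludes the IndexError case, so getD 0 is never the result of an error inside Pre_.
def odd_index_fuel (glist : List Int) : Nat → Int → List Int
  | 0, _ => []
  | Nat.succ f, i =>
    if i = (glist.length : Int) then []
    else
      let new_list := odd_index_fuel glist f (i + 1)
      if i % 2 = 1 then (PySem.List.pyGet? glist i).getD 0 :: new_list
      else new_list

def odd_index (glist : List Int) (i : Int) : List Int :=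
  odd_index_fuel glist (((glist.length : Int) - i).toNat + 1) i

-- ===== PORT B =====
def odd_index_alt (glist : List Int) (i : Int) : List Int :=
  (PySem.List.pyRange i (glist.length : Int) 1).foldl
    (fun result j =>
      if j % 2 = 1 then result ++ [(PySem.List.pyGet? glist j).getD 0]
      else result)
    []

-- ===== PRECONDITION & SPEC =====
-- Pre_ excludes exactly where A raises: i > len (infinite recursion, RecursionError) and
-- i below -len with an odd index in [i, -len) (IndexError in glist[i]).
def Pre_odd_index (glist : List Int) (i : Int) : Prop :=
  i ≤ (glist.length : Int) ∧
    (-(glist.length : Int) ≤ i ∨ (i = -(glist.length : Int) - 1 ∧ i % 2 = 0))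
instance (glist : List Int) (i : Int) : Decidable (Pre_odd_index glist i) := by
  unfold Pre_odd_index; infer_instance

def pvWitness_odd_index : List Int × Int := ([3, 7, 1, 4], 0)

def Spec_odd_index (glist : List Int) (i : Int) (out : List Int) : Prop := out = odd_index_alt glist i
instance (glist : List Int) (i : Int) (out : List Int) : Decidable (Spec_odd_index glist i out) := by unfold Spec_odd_index; infer_instance

-- ===== CLAIM (what is proved, stated in full; the proofs are below) =====
def Claim_equal_odd_index : Prop := ∀ (glist : List Int) (i : Int), Dom_odd_index glist i → Pre_odd_index glist i → Spec_odd_index glist i (odd_index glist i)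

-- ===== LEMMAS AND PROOFS =====

-- B's fold is filter-then-map of the range.
theorem odd_index_alt_eq (glist : List Int) (i : Int) :
    odd_index_alt glist i =
      ((PySem.List.pyRange i (glist.length : Int) 1).filter (fun j => j % 2 = 1)).map
        (fun j => (PySem.List.pyGet? glist j).getD 0) := by
  unfold odd_index_alt
  rw [PySem.List.foldl_append_ite]
  simp

-- With enough fuel, A's recursion computes the same filter-map.
theorem odd_index_fuel_eq (glist : List Int) (f : Nat) :
    ∀ i : Int, i ≤ (glist.length : Int) → ((glist.length : Int) - i).toNat < f →
      odd_index_fuel glist f i =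
        ((PySem.List.pyRange i (glist.length : Int) 1).filter (fun j => j % 2 = 1)).map
          (fun j => (PySem.List.pyGet? glist j).getD 0) := by
  induction f with
  | zero => intro i _ hf; omega
  | succ f ih =>
    intro i hle hf
    by_cases hi : i = (glist.length : Int)
    · simp [odd_index_fuel, hi, PySem.List.pyRange_one_eq_nil (le_refl _)]
    · have hlt : i < (glist.length : Int) := lt_of_le_of_ne hle hi
      rw [PySem.List.pyRange_one_cons hlt]
      have := ih (i + 1) (by omega) (by omega)
      simp only [odd_index_fuel, hi, if_false, List.filter_cons]
      by_cases hodd : i % 2 = 1 <;> simp [hodd, this]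

theorem odd_index_spec' (glist : List Int) (i : Int) (h : Pre_odd_index glist i) :
    odd_index glist i = odd_index_alt glist i := by
  obtain ⟨h1, _⟩ := h
  rw [odd_index_alt_eq, odd_index,
    odd_index_fuel_eq glist _ i h1 (by omega)]

-- ===== VERDICT (by name: the statement is the Claim_ definition above) =====
theorem odd_index_spec : Claim_equal_odd_index := by
  intro glist i _ hpre
  exact odd_index_spec' glist i hpre
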